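-- pv_equiv track=rewrite | github.com/kimsw99/Coding-Test | 프로그래머스/0/181893. 배열 조각하기/배열 조각하기.py | solution
-- ===== SOURCE A (Python) =====
-- def solution(arr, query):
--     a = arr
--     for i, num in enumerate(query):
--         if i % 2 == 0:
--             a = a[:num+1]
--         else:
--             a = a[num:]
--     return a
-- ===== SOURCE B (Python) =====
-- def solution(arr, query):
--     # Track the current window [lo, hi) instead of materialising each slice;
--     # one final slice at the end.
--     lo, hi = 0, len(arr)
--     for i, num in enumerate(query):
--         n = hi - lo
--         k = num + 1 if i % 2 == 0 else num
--         if k < 0: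
--             k += n
--         if k < 0:
--             k = 0
--         elif k > n:
--             k = n
--         if i % 2 == 0:
--             hi = lo + k
--         else:
--             lo = lo + k
--     return arr[lo:hi]
-- ===== Notes on version B (the rewrite author's own statement) =====
-- stated objective: alternative
-- what changed: Instead of materialising a new list for every query slice, B tracks the current window as clamped integer bounds (lo, hi) per query and takes a single slice of arr at the end.
import Mathlib
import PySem

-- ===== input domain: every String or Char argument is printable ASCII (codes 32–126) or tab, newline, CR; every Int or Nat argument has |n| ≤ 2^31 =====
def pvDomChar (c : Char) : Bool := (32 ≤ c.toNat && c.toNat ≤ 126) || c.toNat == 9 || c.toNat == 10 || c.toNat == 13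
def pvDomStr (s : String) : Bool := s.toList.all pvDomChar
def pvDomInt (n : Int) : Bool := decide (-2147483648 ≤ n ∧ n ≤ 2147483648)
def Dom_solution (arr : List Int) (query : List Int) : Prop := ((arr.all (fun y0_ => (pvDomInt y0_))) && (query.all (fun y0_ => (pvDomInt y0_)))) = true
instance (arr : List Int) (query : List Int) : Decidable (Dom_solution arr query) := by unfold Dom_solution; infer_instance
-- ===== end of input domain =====

-- B tracks the current window as a pair of clamped bounds (lo, hi) and performs one final slice,
-- instead of A's materialising a new list per query.


-- ===== PORT A =====
-- the enumerate-loop: recursion over query carrying the index i and the current list a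
def solutionGoA : List Int → Nat → List Int → List Int
  | [], _, a => a
  | num :: rest, i, a =>
    solutionGoA rest (i + 1)
      (if i % 2 = 0 then PySem.List.slice a none (some (num + 1))
       else PySem.List.slice a (some num) none)

def solution (arr : List Int) (query : List Int) : List Int :=
  solutionGoA query 0 arr

-- ===== PORT B =====
-- clamp of Source B: resolve slice index k against window length n
def solutionClampB (k n : Int) : Int :=
  let k' := if k < 0 then k + n else k
  if k' < 0 then 0 else if k' > n then n else k'

-- the loop of Source B: recursion over query carrying the index i and the window bounds lo, hi
def solutionGoB : List Int → Nat → Int → Int → Int × Int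
  | [], _, lo, hi => (lo, hi)
  | num :: rest, i, lo, hi =>
    let n := hi - lo
    let k := solutionClampB (if i % 2 = 0 then num + 1 else num) n
    if i % 2 = 0 then solutionGoB rest (i + 1) lo (lo + k)
    else solutionGoB rest (i + 1) (lo + k) hi

def solution_alt (arr : List Int) (query : List Int) : List Int :=
  let p := solutionGoB query 0 0 (arr.length : Int)
  PySem.List.slice arr (some p.1) (some p.2)

-- ===== PRECONDITION & SPEC =====
def Spec_solution (arr : List Int) (query : List Int) (out : List Int) : Prop := out = solution_alt arr query
instance (arr : List Int) (query : List Int) (out : List Int) : Decidable (Spec_solution arr query out) := by unfold Spec_solution; infer_instance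

-- ===== CLAIM (what is proved, stated in full; the proofs are below) =====
def Claim_equal_solution : Prop := ∀ (arr : List Int) (query : List Int), Dom_solution arr query → Spec_solution arr query (solution arr query)

-- ===== LEMMAS AND PROOFS =====

lemma clampIdx_eq_toNat {n : Nat} {a : Int} (h0 : 0 ≤ a) (h1 : a ≤ (n : Int)) :
    PySem.List.clampIdx n a = a.toNat := by
  simp only [PySem.List.clampIdx]
  split_ifs <;> omega

lemma solutionClampB_bounds (k n : Int) (hn : 0 ≤ n) :
    0 ≤ solutionClampB k n ∧ solutionClampB k n ≤ n := by
  simp only [solutionClampB]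
  split_ifs <;> omega

-- B's clamp agrees with Python slice-index resolution on a window of length n
lemma clampB_toNat_eq_clampIdx (k : Int) (n : Nat) :
    (solutionClampB k (n : Int)).toNat = PySem.List.clampIdx n k := by
  simp only [solutionClampB, PySem.List.clampIdx]
  split_ifs <;> omega

-- window form of a slice with in-range nonnegative bounds
lemma slice_window (arr : List Int) (lo hi : Int) (h0 : 0 ≤ lo) (h1 : lo ≤ hi)
    (h2 : hi ≤ (arr.length : Int)) :
    PySem.List.slice arr (some lo) (some hi)
      = (arr.drop lo.toNat).take (hi.toNat - lo.toNat) := by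
  simp only [PySem.List.slice, clampIdx_eq_toNat h0 (le_trans h1 h2),
    clampIdx_eq_toNat (le_trans h0 h1) h2]

lemma window_length (arr : List Int) (lo hi : Int) (_h0 : 0 ≤ lo) (h1 : lo ≤ hi)
    (h2 : hi ≤ (arr.length : Int)) :
    ((arr.drop lo.toNat).take (hi.toNat - lo.toNat)).length = hi.toNat - lo.toNat := by
  simp only [List.length_take, List.length_drop]
  omega

-- even step: a[:k] on the window is a narrowing of hi
lemma step_even (arr : List Int) (k lo hi : Int) (h0 : 0 ≤ lo) (h1 : lo ≤ hi)
    (h2 : hi ≤ (arr.length : Int)) :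
    PySem.List.slice (PySem.List.slice arr (some lo) (some hi)) none (some k)
      = PySem.List.slice arr (some lo) (some (lo + solutionClampB k (hi - lo))) := by
  have hc := solutionClampB_bounds k (hi - lo) (by omega)
  have hm : hi - lo = ((hi.toNat - lo.toNat : Nat) : Int) := by omega
  have hct : (solutionClampB k (hi - lo)).toNat = PySem.List.clampIdx (hi.toNat - lo.toNat) k := by
    rw [hm]; exact clampB_toNat_eq_clampIdx k _
  have hle := PySem.List.clampIdx_le (hi.toNat - lo.toNat) k
  rw [slice_window arr lo hi h0 h1 h2,
      slice_window arr lo (lo + solutionClampB k (hi - lo)) h0 (by omega) (by omega)]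
  simp only [PySem.List.slice, window_length arr lo hi h0 h1 h2, List.drop_zero, Nat.sub_zero]
  rw [List.take_take]
  congr 1
  omega

-- odd step: a[k:] on the window is an advancing of lo
lemma step_odd (arr : List Int) (k lo hi : Int) (h0 : 0 ≤ lo) (h1 : lo ≤ hi)
    (h2 : hi ≤ (arr.length : Int)) :
    PySem.List.slice (PySem.List.slice arr (some lo) (some hi)) (some k) none
      = PySem.List.slice arr (some (lo + solutionClampB k (hi - lo))) (some hi) := by
  have hc := solutionClampB_bounds k (hi - lo) (by omega)
  have hm : hi - lo = ((hi.toNat - lo.toNat : Nat) : Int) := by omega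
  have hct : (solutionClampB k (hi - lo)).toNat = PySem.List.clampIdx (hi.toNat - lo.toNat) k := by
    rw [hm]; exact clampB_toNat_eq_clampIdx k _
  have hle := PySem.List.clampIdx_le (hi.toNat - lo.toNat) k
  rw [slice_window arr lo hi h0 h1 h2,
      slice_window arr (lo + solutionClampB k (hi - lo)) hi (by omega) (by omega) h2]
  simp only [PySem.List.slice, window_length arr lo hi h0 h1 h2]
  rw [List.drop_take, List.drop_drop, List.take_take]
  have e1 : (lo + solutionClampB k (hi - lo)).toNat
      = lo.toNat + PySem.List.clampIdx (hi.toNat - lo.toNat) k := by omega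
  have e2 : min (hi.toNat - lo.toNat - PySem.List.clampIdx (hi.toNat - lo.toNat) k)
        (hi.toNat - lo.toNat - PySem.List.clampIdx (hi.toNat - lo.toNat) k)
      = hi.toNat - (lo + solutionClampB k (hi - lo)).toNat := by omega
  rw [e1, e2]
  congr 1
  omega

-- loop invariant: A's current list is the slice of arr by B's window
lemma loop_inv (arr : List Int) : ∀ (q : List Int) (i : Nat) (lo hi : Int),
    0 ≤ lo → lo ≤ hi → hi ≤ (arr.length : Int) →
    solutionGoA q i (PySem.List.slice arr (some lo) (some hi))
      = PySem.List.slice arr (some (solutionGoB q i lo hi).1) (some (solutionGoB q i lo hi).2) := by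
  intro q
  induction q with
  | nil => intro i lo hi _ _ _; rfl
  | cons num rest ih =>
    intro i lo hi h0 h1 h2
    by_cases hp : i % 2 = 0
    · have hc := solutionClampB_bounds (num + 1) (hi - lo) (by omega)
      simp only [solutionGoA, solutionGoB, hp, if_true]
      rw [step_even arr (num + 1) lo hi h0 h1 h2]
      exact ih (i + 1) lo (lo + solutionClampB (num + 1) (hi - lo)) h0 (by omega) (by omega)
    · have hc := solutionClampB_bounds num (hi - lo) (by omega)
      simp only [solutionGoA, solutionGoB, hp, if_false]
      rw [step_odd arr num lo hi h0 h1 h2]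
      exact ih (i + 1) (lo + solutionClampB num (hi - lo)) hi (by omega) (by omega) h2

-- ===== VERDICT (by name: the statement is the Claim_ definition above) =====
theorem solution_spec : Claim_equal_solution := by
  intro arr query _
  unfold Spec_solution solution solution_alt
  have h := loop_inv arr query 0 0 (arr.length : Int) le_rfl (Int.natCast_nonneg _) le_rfl
  rw [← h]
  congr 1
  rw [slice_window arr 0 (arr.length : Int) le_rfl (Int.natCast_nonneg _) le_rfl]
  simp
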